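-- pv_equiv track=rewrite | github.com/alok0366/Programs | Contests/codility.py | solution
-- ===== SOURCE A (Python) =====
-- def solution(H):
--     stack1=[]
--     stack2=[]
--     n=len(H)
--     mx=max(H)
--     for i in range(n):
--         if H[i]==mx:
--             break
--         else:
--             stack1.append((H[i]))
--     for i in range(n-1,-1,-1):
--         if H[i]==mx:
--             break
--         else:
--             stack2.append((H[i]))
--     l1=len(stack1)
--     l2=len(stack2)
--     if l1 and l2:
--         m1=max(stack1)
--         m2=max(stack2)
--         if m1==m2:
--             if l1>l2:
--                 return (mx*(n-l1)+m1*l1)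
--             else:
--                 return (mx*(n-l2)+m2*l2)
--         else:
--             if m1>m2:
--                 return (mx*(n-l2)+m2*l2)
--             else:
--                 return (mx*(n-l1)+m1*l1)
--     elif l1:
--         m1=max(stack1)
--         return (mx*(n-l1)+m1*l1)
--     elif l2:
--         m2=max(stack2)
--         return (mx*(n-l2)+m2*l2)
--     else:
--         return (mx*n)
-- ===== SOURCE B (Python) =====
-- def solution(H):
--     # one left-to-right pass maintaining running max, length/max of the prefix
--     # before its first occurrence and of the suffix after its last occurrence
--     mx = H[0]
--     pre_len, pre_max = 0, None
--     suf_len, suf_max = 0, None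
--     for k, x in enumerate(H[1:], 1):
--         if x > mx:
--             pre_len, pre_max = k, mx
--             mx = x
--             suf_len, suf_max = 0, None
--         elif x == mx:
--             suf_len, suf_max = 0, None
--         else:
--             suf_len += 1
--             suf_max = x if suf_max is None else max(suf_max, x)
--     n = len(H)
--     if pre_max is None and suf_max is None:
--         return mx * n
--     if suf_max is None or (pre_max is not None and
--                            (pre_max < suf_max or (pre_max == suf_max and pre_len > suf_len))):
--         m, l = pre_max, pre_len
--     else:
--         m, l = suf_max, suf_len
--     return mx * (n - l) + m * l
-- ===== Notes on version B (the rewrite author's own statement) =====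
-- stated objective: alternative
-- what changed: Replaces A's staged passes (global max, a forward break-loop building stack1, a backward break-loop building stack2, then a 4-way if/elif cascade) by a single left-to-right fold whose accumulator maintains the running max together with the length/max of the prefix before its first occurrence and of the suffix after its last occurrence, updated incrementally as the running max changes.
import Mathlib
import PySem

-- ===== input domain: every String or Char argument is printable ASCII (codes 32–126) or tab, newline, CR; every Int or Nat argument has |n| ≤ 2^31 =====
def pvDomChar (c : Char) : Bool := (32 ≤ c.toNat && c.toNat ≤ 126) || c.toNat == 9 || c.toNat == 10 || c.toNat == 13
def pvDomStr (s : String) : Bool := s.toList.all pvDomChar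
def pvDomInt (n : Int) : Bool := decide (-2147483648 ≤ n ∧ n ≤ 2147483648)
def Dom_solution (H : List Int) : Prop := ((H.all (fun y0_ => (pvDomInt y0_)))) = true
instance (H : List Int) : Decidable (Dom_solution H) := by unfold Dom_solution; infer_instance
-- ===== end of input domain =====

-- B replaces A's staged passes (max, forward break-loop, backward break-loop,
-- 4-way cascade) by ONE left-to-right fold maintaining the running max and the
-- length/max of the prefix before its first and suffix after its last occurrence
-- (objective: alternative single-pass algorithm, same O(n) cost).

-- ===== PORT A =====
-- the break-loop: push elements until the first one equal to mx
def aCollect (mx : Int) : List Int → List Int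
  | [] => []
  | h :: t => if h == mx then [] else h :: aCollect mx t

def solution (H : List Int) : Int :=
  match PySem.List.max? H (fun y => y) with
  | none => 0   -- Python: max([]) raises ValueError; excluded by Pre_solution
  | some mx =>
    let n : Int := H.length
    let stack1 := aCollect mx H
    let stack2 := aCollect mx H.reverse
    let l1 : Int := stack1.length
    let l2 : Int := stack2.length
    if l1 ≠ 0 ∧ l2 ≠ 0 then
      let m1 := (PySem.List.max? stack1 (fun y => y)).getD 0
      let m2 := (PySem.List.max? stack2 (fun y => y)).getD 0
      if m1 = m2 then
        if l1 > l2 then mx * (n - l1) + m1 * l1 else mx * (n - l2) + m2 * l2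
      else
        if m1 > m2 then mx * (n - l2) + m2 * l2 else mx * (n - l1) + m1 * l1
    else if l1 ≠ 0 then
      mx * (n - l1) + ((PySem.List.max? stack1 (fun y => y)).getD 0) * l1
    else if l2 ≠ 0 then
      mx * (n - l2) + ((PySem.List.max? stack2 (fun y => y)).getD 0) * l2
    else mx * n

-- ===== PORT B =====
-- loop body of Source B: state (mx, pre_len, pre_max, suf_len, suf_max, k)
def bStep (s : Int × Int × Option Int × Int × Option Int × Int) (x : Int) :
    Int × Int × Option Int × Int × Option Int × Int :=
  let (mx, preLen, preMax, sufLen, sufMax, k) := s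
  if x > mx then (x, k, some mx, 0, none, k + 1)
  else if x = mx then (mx, preLen, preMax, 0, none, k + 1)
  else (mx, preLen, preMax, sufLen + 1,
        some (match sufMax with | none => x | some m => max m x), k + 1)

def solution_alt (H : List Int) : Int :=
  match H with
  | [] => 0   -- Python: H[0] raises IndexError; excluded by Pre_solution
  | h :: t =>
    let s := t.foldl bStep (h, 0, none, 0, none, 1)
    let mx := s.1
    let preLen := s.2.1
    let preMax := s.2.2.1
    let sufLen := s.2.2.2.1
    let sufMax := s.2.2.2.2.1
    let n : Int := H.length
    match preMax, sufMax with
    | none, none => mx * n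
    | some m1, none => mx * (n - preLen) + m1 * preLen
    | none, some m2 => mx * (n - sufLen) + m2 * sufLen
    | some m1, some m2 =>
      if m1 < m2 ∨ (m1 = m2 ∧ preLen > sufLen) then mx * (n - preLen) + m1 * preLen
      else mx * (n - sufLen) + m2 * sufLen

-- ===== PRECONDITION & SPEC =====
-- Pre_ excludes only the empty list, on which Python's max(H) (resp. H[0]) raises.
def Pre_solution (H : List Int) : Prop := H ≠ []
instance (H : List Int) : Decidable (Pre_solution H) := by unfold Pre_solution; infer_instance
def pvWitness_solution : List Int := [1, 3, 2]

def Spec_solution (H : List Int) (out : Int) : Prop := out = solution_alt H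
instance (H : List Int) (out : Int) : Decidable (Spec_solution H out) := by unfold Spec_solution; infer_instance

-- ===== CLAIM (what is proved, stated in full; the proofs are below) =====
def Claim_equal_solution : Prop := ∀ (H : List Int), Dom_solution H → Pre_solution H → Spec_solution H (solution H)

-- ===== LEMMAS AND PROOFS =====

theorem aCollect_eq_takeWhile (mx : Int) (l : List Int) :
    aCollect mx l = l.takeWhile (fun h => !(h == mx)) := by
  induction l with
  | nil => rfl
  | cons h t ih =>
    simp [aCollect, List.takeWhile_cons]
    by_cases hh : h = mx <;> simp [hh, ih]

theorem foldl_max_swap (l : List Int) (a b : Int) :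
    l.foldl max (max a b) = max (l.foldl max a) b := by
  induction l generalizing a with
  | nil => rfl
  | cons c t ih =>
    simp only [List.foldl_cons]
    rw [max_right_comm a b c, ih]

theorem takeWhile_append_of_all {p : Int → Bool} {l : List Int} (r : List Int)
    (h : ∀ y ∈ l, p y = true) :
    (l ++ r).takeWhile p = l ++ r.takeWhile p := by
  induction l with
  | nil => simp
  | cons c t ih =>
    have hc : p c = true := h c (by simp)
    simp [hc, ih (fun y hy => h y (by simp [hy]))]

theorem takeWhile_append_of_mem {p : Int → Bool} {l : List Int} {a : Int} (r : List Int)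
    (ha : a ∈ l) (hpa : p a = false) :
    (l ++ r).takeWhile p = l.takeWhile p := by
  induction l with
  | nil => cases ha
  | cons c t ih =>
    by_cases hc : p c = true
    · have ha' : a ∈ t := by
        cases ha with
        | head => rw [hpa] at hc; cases hc
        | tail _ h => exact h
      simp [hc, ih ha']
    · simp [Bool.eq_false_iff.mpr hc]

-- fold characterization: the single-pass state equals A's staged quantities
theorem fold_char (h : Int) (t : List Int) :
    t.foldl bStep (h, 0, none, 0, none, 1) =
      (t.foldl max h,
       (((h :: t).takeWhile (fun y => !(y == t.foldl max h))).length : Int),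
       PySem.List.max? ((h :: t).takeWhile (fun y => !(y == t.foldl max h))) (fun y => y),
       (((h :: t).reverse.takeWhile (fun y => !(y == t.foldl max h))).length : Int),
       PySem.List.max? ((h :: t).reverse.takeWhile (fun y => !(y == t.foldl max h))) (fun y => y),
       (((h :: t).length : Int))) := by
  induction t using List.reverseRecOn with
  | nil => simp [PySem.List.max?]
  | append_singleton t' x ih =>
    set M' := t'.foldl max h with hM'
    have hMs : PySem.List.max? (h :: t') (fun y => y) = some M' := by
      rw [hM']; exact PySem.List.max?_id_cons h t'
    have hMmem : M' ∈ h :: t' := PySem.List.max?_mem hMs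
    have hMmax : ∀ y ∈ h :: t', y ≤ M' := PySem.List.max?_isMax hMs
    have hMnew : (t' ++ [x]).foldl max h = max M' x := by
      rw [List.foldl_append]; rfl
    rw [List.foldl_append, ih]
    simp only [List.foldl_cons, List.foldl_nil, bStep]
    rcases lt_trichotomy M' x with hlt | heq | hgt
    · -- x is a new strict maximum
      have hMx : (t' ++ [x]).foldl max h = x := by rw [hMnew]; exact max_eq_right hlt.le
      have hP : ((h :: t') ++ [x]).takeWhile (fun y => !(y == x)) = h :: t' := by
        rw [takeWhile_append_of_all [x]
          (fun y hy => by simp; exact ne_of_lt (lt_of_le_of_lt (hMmax y hy) hlt))]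
        simp [List.takeWhile_cons]
      have hS : ((h :: t') ++ [x]).reverse.takeWhile (fun y => !(y == x)) = [] := by
        simp [List.takeWhile_cons]
      rw [if_pos hlt, hMx]
      rw [show (h :: (t' ++ [x])) = (h :: t') ++ [x] from by simp, hP, hS]
      refine Prod.ext rfl (Prod.ext rfl (Prod.ext ?_ (Prod.ext (by simp) (Prod.ext rfl ?_))))
      · exact hMs.symm
      · show ((h :: t').length : Int) + 1 = (((h :: (t' ++ [x])).length : Int))
        simp only [List.length_cons, List.length_append, List.length_nil]; push_cast; omega
    · -- x equals the running maximum
      have hMx : (t' ++ [x]).foldl max h = M' := by rw [hMnew, heq]; exact max_self x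
      have hP : ((h :: t') ++ [x]).takeWhile (fun y => !(y == M')) =
          (h :: t').takeWhile (fun y => !(y == M')) :=
        takeWhile_append_of_mem [x] hMmem (by simp)
      have hS : ((h :: t') ++ [x]).reverse.takeWhile (fun y => !(y == M')) = [] := by
        simp [heq]
      rw [if_neg (by omega), if_pos heq.symm, hMx]
      rw [show (h :: (t' ++ [x])) = (h :: t') ++ [x] from by simp, hP, hS]
      refine Prod.ext rfl (Prod.ext rfl (Prod.ext rfl (Prod.ext (by simp) (Prod.ext rfl ?_))))
      show ((h :: t').length : Int) + 1 = (((h :: (t' ++ [x])).length : Int))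
      simp only [List.length_cons, List.length_append, List.length_nil]; push_cast; omega
    · -- x is strictly below the running maximum
      have hMx : (t' ++ [x]).foldl max h = M' := by rw [hMnew]; exact max_eq_left hgt.le
      have hP : ((h :: t') ++ [x]).takeWhile (fun y => !(y == M')) =
          (h :: t').takeWhile (fun y => !(y == M')) :=
        takeWhile_append_of_mem [x] hMmem (by simp)
      have hS : ((h :: t') ++ [x]).reverse.takeWhile (fun y => !(y == M')) =
          x :: (h :: t').reverse.takeWhile (fun y => !(y == M')) := by
        simp [ne_of_lt hgt]
      rw [if_neg (by omega), if_neg (ne_of_lt hgt), hMx]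
      rw [show (h :: (t' ++ [x])) = (h :: t') ++ [x] from by simp, hP, hS]
      refine Prod.ext rfl (Prod.ext rfl (Prod.ext rfl (Prod.ext ?_ (Prod.ext ?_ ?_))))
      · simp only [List.length_cons]; push_cast; omega
      · cases hSold : (h :: t').reverse.takeWhile (fun y => !(y == M')) with
        | nil => rfl
        | cons s ss =>
          have hfx : ss.foldl max (max x s) = max (ss.foldl max s) x := by
            rw [max_comm x s, foldl_max_swap]
          rw [show PySem.List.max? (s :: ss) (fun y => y) = some (ss.foldl max s) from
                PySem.List.max?_id_cons s ss]
          show some (max (ss.foldl max s) x) = PySem.List.max? (x :: s :: ss) (fun y => y)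
          rw [show PySem.List.max? (x :: s :: ss) (fun y => y) = some ((s :: ss).foldl max x) from
                PySem.List.max?_id_cons x (s :: ss), List.foldl_cons, hfx]
      · show ((h :: t').length : Int) + 1 = (((h :: t') ++ [x]).length : Int)
        simp only [List.length_cons, List.length_append, List.length_nil]; push_cast; omega

theorem solution_spec' (H : List Int) (hne : H ≠ []) : solution H = solution_alt H := by
  match H with
  | [] => exact absurd rfl hne
  | h :: t =>
    set M := t.foldl max h with hM
    have hmax : PySem.List.max? (h :: t) (fun y => y) = some M := by
      rw [hM]; exact PySem.List.max?_id_cons h t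
    set P := (h :: t).takeWhile (fun y => !(y == M)) with hP
    set S := (h :: t).reverse.takeWhile (fun y => !(y == M)) with hS
    simp only [solution, solution_alt, hmax, fold_char, aCollect_eq_takeWhile, ← hM, ← hP, ← hS]
    by_cases h1 : P = [] <;> by_cases h2 : S = []
    · simp [h1, h2, PySem.List.max?]
    · obtain ⟨s, ss, h2'⟩ := List.exists_cons_of_ne_nil h2
      rw [h2', show PySem.List.max? (s :: ss) (fun y => y) = some (ss.foldl max s) from
        PySem.List.max?_id_cons s ss]
      simp only [h1]
      rw [if_neg (by simp), if_neg (by simp), if_pos (by simp; omega)]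
      rfl
    · obtain ⟨p, ps, h1'⟩ := List.exists_cons_of_ne_nil h1
      rw [h1', show PySem.List.max? (p :: ps) (fun y => y) = some (ps.foldl max p) from
        PySem.List.max?_id_cons p ps]
      simp only [h2]
      rw [if_neg (by simp), if_pos (by simp; omega)]
      rfl
    · obtain ⟨p, ps, h1'⟩ := List.exists_cons_of_ne_nil h1
      obtain ⟨s, ss, h2'⟩ := List.exists_cons_of_ne_nil h2
      rw [h1', h2',
        show PySem.List.max? (p :: ps) (fun y => y) = some (ps.foldl max p) from
          PySem.List.max?_id_cons p ps,
        show PySem.List.max? (s :: ss) (fun y => y) = some (ss.foldl max s) from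
          PySem.List.max?_id_cons s ss]
      rw [if_pos (by constructor <;> simp <;> omega)]
      simp only [Option.getD_some]
      by_cases hmm : ps.foldl max p = ss.foldl max s
      · rw [if_pos hmm]
        by_cases hl : (((p :: ps).length : Int) > ((s :: ss).length : Int))
        · rw [if_pos hl, if_pos (Or.inr ⟨hmm, hl⟩), hmm]
        · rw [if_neg hl, if_neg (by push_neg; exact ⟨hmm.ge, fun _ => not_lt.mp hl⟩)]
      · by_cases hgt : ss.foldl max s < ps.foldl max p
        · rw [if_neg hmm, if_pos hgt, if_neg (by push_neg; exact ⟨hgt.le, fun h => absurd h hmm⟩)]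
        · rw [if_neg hmm, if_neg hgt, if_pos (Or.inl (lt_of_le_of_ne (not_lt.mp hgt) hmm))]

-- ===== VERDICT (by name: the statement is the Claim_ definition above) =====
theorem solution_spec : Claim_equal_solution := by
  intro H _ hpre
  unfold Spec_solution
  exact solution_spec' H hpre
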